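-- pv_equiv track=rewrite | github.com/Coenenp/eBookManagement | books/views/user_settings.py | _generate_sample_result
-- ===== SOURCE A (Python) =====
-- def _generate_sample_result(folder_pattern, filename_pattern):
--     """Generate a sample file path from patterns for preview."""
--     # Sample replacements for common tokens
--     replacements = {
--         "${language}": "English",
--         "${author.sortname}": "Asimov, Isaac",
--         "${author}": "Isaac Asimov",
--         "${title}": "Foundation",
--         "${category}": "Fiction",
--         "${bookseries.title}": "Foundation Series",
--         "${bookseries.number}": "01",
--         "${format}": "ebook",
--         "${ext}": "epub",
--     }
--
--     folder = folder_pattern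
--     filename = filename_pattern
--
--     # Replace all tokens
--     for token, value in replacements.items():
--         folder = folder.replace(token, value)
--         filename = filename.replace(token, value)
--
--     return f"{folder}/{filename}"
-- ===== SOURCE B (Python) =====
-- def _generate_sample_result(folder_pattern, filename_pattern):
--     """Generate a sample file path from patterns for preview."""
--     # Same sample values as before, but substituted in ONE left-to-right scan
--     # per pattern instead of nine full .replace passes.  This is equivalent:
--     # no token is a prefix of another, tokens contain '$' only at the start,
--     # and no value contains '$' or occurs inside a token, so occurrences are
--     # disjoint and no replacement can create or destroy another token.
--     replacements = {
--         "${language}": "English",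
--         "${author.sortname}": "Asimov, Isaac",
--         "${author}": "Isaac Asimov",
--         "${title}": "Foundation",
--         "${category}": "Fiction",
--         "${bookseries.title}": "Foundation Series",
--         "${bookseries.number}": "01",
--         "${format}": "ebook",
--         "${ext}": "epub",
--     }
--     items = list(replacements.items())
--
--     def substitute(s):
--         parts = []
--         i = 0
--         n = len(s)
--         while i < n:
--             for token, value in items:
--                 if s.startswith(token, i):
--                     parts.append(value)
--                     i += len(token)
--                     break
--             else:
--                 parts.append(s[i])
--                 i += 1
--         return "".join(parts)
--
--     return f"{substitute(folder_pattern)}/{substitute(filename_pattern)}"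
-- ===== Notes on version B (the rewrite author's own statement) =====
-- stated objective: alternative
-- what changed: Replaces the nine sequential full-string .replace passes with a single left-to-right scan that substitutes the first matching token at each position (equivalent because no token is a prefix of another, tokens contain '$' only at the start, and no value contains '$' or occurs inside a token).
import Mathlib
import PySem

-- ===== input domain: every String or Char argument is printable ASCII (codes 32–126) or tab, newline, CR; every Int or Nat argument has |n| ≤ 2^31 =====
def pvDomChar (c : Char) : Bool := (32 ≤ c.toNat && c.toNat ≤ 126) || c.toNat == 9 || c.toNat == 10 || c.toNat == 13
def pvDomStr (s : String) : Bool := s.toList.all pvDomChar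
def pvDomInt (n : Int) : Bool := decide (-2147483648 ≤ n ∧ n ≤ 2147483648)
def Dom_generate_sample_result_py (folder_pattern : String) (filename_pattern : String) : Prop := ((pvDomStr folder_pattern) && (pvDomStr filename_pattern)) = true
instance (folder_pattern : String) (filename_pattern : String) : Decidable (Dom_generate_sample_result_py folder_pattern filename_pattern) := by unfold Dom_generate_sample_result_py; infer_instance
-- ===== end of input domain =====

-- B replaces A's nine sequential full-string .replace passes by a single left-to-right
-- scan that substitutes the first matching token at each position; return values proved equal.

-- ===== PORT A =====
-- the dict literal of A (distinct keys; .items() iterates in insertion order)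
def pvReplacements : List (String × String) :=
  [("${language}", "English"),
   ("${author.sortname}", "Asimov, Isaac"),
   ("${author}", "Isaac Asimov"),
   ("${title}", "Foundation"),
   ("${category}", "Fiction"),
   ("${bookseries.title}", "Foundation Series"),
   ("${bookseries.number}", "01"),
   ("${format}", "ebook"),
   ("${ext}", "epub")]

def generate_sample_result_py (folder_pattern : String) (filename_pattern : String) : String :=
  let fs := pvReplacements.foldl
    (fun (st : String × String) p => (PySem.Str.replace st.1 p.1 p.2, PySem.Str.replace st.2 p.1 p.2))
    (folder_pattern, filename_pattern)
  fs.1 ++ "/" ++ fs.2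

-- ===== PORT B =====
-- Source B's `items` table, as lists of code points
def pvItems : List (List Char × List Char) :=
  [("${language}".toList, "English".toList),
   ("${author.sortname}".toList, "Asimov, Isaac".toList),
   ("${author}".toList, "Isaac Asimov".toList),
   ("${title}".toList, "Foundation".toList),
   ("${category}".toList, "Fiction".toList),
   ("${bookseries.title}".toList, "Foundation Series".toList),
   ("${bookseries.number}".toList, "01".toList),
   ("${format}".toList, "ebook".toList),
   ("${ext}".toList, "epub".toList)]

-- Source B's `substitute` while-loop: at position i it tries the tokens in order
-- (the for/break = List.find?); on a match it emits the value and jumps past the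
-- token (for a nonempty token, rest.drop (t.length - 1) = (c :: rest).drop t.length),
-- otherwise it emits the character s[i] and advances by one.  `parts` plus the final
-- "".join is the concatenation built by the recursion; s.startswith(token, i) on the
-- current suffix is List.isPrefixOf (exact on code points).
def pvScan (tbl : List (List Char × List Char)) (s : List Char) : List Char :=
  match s with
  | [] => []
  | c :: rest =>
    match tbl.find? (fun p => p.1.isPrefixOf (c :: rest)) with
    | some p => p.2 ++ pvScan tbl (rest.drop (p.1.length - 1))
    | none => c :: pvScan tbl rest
termination_by s.length
decreasing_by
· simp only [List.length_cons, List.length_drop]; omega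
· simp

def generate_sample_result_py_alt (folder_pattern : String) (filename_pattern : String) : String :=
  String.ofList (pvScan pvItems folder_pattern.toList) ++ "/" ++
    String.ofList (pvScan pvItems filename_pattern.toList)

-- ===== PRECONDITION & SPEC =====
def Spec_generate_sample_result_py (folder_pattern : String) (filename_pattern : String) (out : String) : Prop := out = generate_sample_result_py_alt folder_pattern filename_pattern
instance (folder_pattern : String) (filename_pattern : String) (out : String) : Decidable (Spec_generate_sample_result_py folder_pattern filename_pattern out) := by unfold Spec_generate_sample_result_py; infer_instance

-- ===== CLAIM (what is proved, stated in full; the proofs are below) =====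
def Claim_equal_generate_sample_result_py : Prop := ∀ (folder_pattern : String) (filename_pattern : String), Dom_generate_sample_result_py folder_pattern filename_pattern → Spec_generate_sample_result_py folder_pattern filename_pattern (generate_sample_result_py folder_pattern filename_pattern)

-- ===== LEMMAS AND PROOFS =====

-- fuel-free restatement of PySem.Chars.replace (for a nonempty `old`)
def pvMyRep (t v : List Char) (s : List Char) : List Char :=
  match s with
  | [] => []
  | c :: rest =>
    if t.isPrefixOf (c :: rest) then v ++ pvMyRep t v (rest.drop (t.length - 1))
    else c :: pvMyRep t v rest
termination_by s.length
decreasing_by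
· simp only [List.length_cons, List.length_drop]; omega
· simp

theorem pvGo_eq (t v : List Char) (ht : t ≠ []) :
    ∀ (fuel : Nat) (l acc : List Char), l.length ≤ fuel →
      PySem.Chars.replace.go t v fuel l acc = acc.reverse ++ pvMyRep t v l := by
  intro fuel
  induction fuel with
  | zero =>
    intro l acc hl
    have : l = [] := List.eq_nil_of_length_eq_zero (by omega)
    subst this
    simp [PySem.Chars.replace.go, pvMyRep]
  | succ n ih =>
    intro l acc hl
    have htl : 1 ≤ t.length := by
      cases t with
      | nil => exact absurd rfl ht
      | cons a b => simp
    cases l with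
    | nil => simp [PySem.Chars.replace.go, pvMyRep]
    | cons c rest =>
      have hlr : rest.length + 1 ≤ n + 1 := by simpa using hl
      rw [PySem.Chars.replace.go]
      by_cases h : t.isPrefixOf (c :: rest)
      · have hd : (c :: rest).drop t.length = rest.drop (t.length - 1) := by
          cases t with
          | nil => exact absurd rfl ht
          | cons a b => simp
        simp only [h, if_true]
        rw [hd, ih _ _ (by simp only [List.length_drop]; omega)]
        rw [pvMyRep]
        simp [h]
      · rw [if_neg h, ih rest (c :: acc) (by omega)]
        rw [pvMyRep]
        simp [h]

theorem pvReplace_eq (t v s : List Char) (ht : t ≠ []) :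
    PySem.Chars.replace s t v = pvMyRep t v s := by
  rw [PySem.Chars.replace]
  rw [if_neg (by simpa using ht)]
  simpa using pvGo_eq t v ht s.length s [] le_rfl

theorem pvScan_nil_table : ∀ s : List Char, pvScan [] s = s := by
  intro s
  induction s with
  | nil => rw [pvScan]
  | cons c rest ih => rw [pvScan]; simpa using ih

-- D: as long as `t` (which starts with '$') cannot match — because the next characters
-- come from a '$'-free (after its head) prefix u of s — myRep copies u verbatim
theorem pvMyRep_copy (t v : List Char) (ht : t.head? = some '$') :
    ∀ (u s : List Char), u <+: s → ¬ t.isPrefixOf s → '$' ∉ u.drop 1 →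
      pvMyRep t v s = u ++ pvMyRep t v (s.drop u.length) := by
  intro u
  induction u with
  | nil => intro s _ _ _; simp
  | cons a u₂ ihu =>
    intro s hu hne hd
    obtain ⟨z, hz⟩ := hu
    cases s with
    | nil => simp at hz
    | cons b rest =>
      have hz' : a :: (u₂ ++ z) = b :: rest := by simpa using hz
      have hab : a = b := (List.cons.injEq _ _ _ _ ▸ hz').1
      have hrest : u₂ ++ z = rest := (List.cons.injEq _ _ _ _ ▸ hz').2
      subst hab
      rw [pvMyRep, if_neg hne]
      cases u₂ with
      | nil => simp
      | cons a2 u3 =>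
        have hne2 : ¬ t.isPrefixOf rest := by
          cases t with
          | nil => simp at ht
          | cons tc tt =>
            have htc : tc = '$' := by simpa using ht
            cases rest with
            | nil => intro hcon; simp [List.isPrefixOf] at hcon
            | cons rc rr =>
              have hrc : rc = a2 := by
                have := congrArg (·.head?) hrest; simpa using this.symm
              intro hcon
              simp [List.isPrefixOf] at hcon
              apply hd
              have ha2 : a2 = '$' := by rw [← hrc, ← hcon.1, htc]
              simp [ha2]
        have hd2 : '$' ∉ List.drop 1 (a2 :: u3) := by
          intro hmem
          simp only [List.drop_succ_cons, List.drop_zero] at hmem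
          exact hd (by simp [hmem])
        have := ihu rest ⟨z, hrest⟩ hne2 hd2
        simp only [List.length_cons, List.drop_succ_cons]
        rw [this]
        simp

-- C: a prefix of the replaced string that ends with '}' and does not contain the
-- value v as a factor was already a prefix of the original string
theorem pvPrefix_transfer (t v : List Char) (hv2 : '}' ∉ v) :
    ∀ (s u : List Char), u ≠ [] → u.getLast? = some '}' → ¬ v <:+: u →
      u <+: pvMyRep t v s → u <+: s := by
  intro s
  induction s with
  | nil =>
    intro u hu _ _ hpre
    rw [pvMyRep] at hpre
    simp [List.prefix_nil] at hpre
    exact absurd hpre hu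
  | cons c rest ih =>
    intro u hu hlast hinf hpre
    rw [pvMyRep] at hpre
    by_cases h : t.isPrefixOf (c :: rest)
    · rw [if_pos h] at hpre
      rcases le_or_gt u.length v.length with hle | hgt
      · have huv : u <+: v := (List.isPrefix_append_of_length hle).mp hpre
        exact absurd (huv.subset (List.mem_of_getLast? hlast)) hv2
      · have hvu : v <+: u := by
          have hvp : v <+: v ++ pvMyRep t v (List.drop (t.length - 1) rest) := List.prefix_append _ _
          rcases List.prefix_or_prefix_of_prefix hpre hvp with h1 | h1
          · exact absurd (h1.subset (List.mem_of_getLast? hlast)) hv2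
          · exact h1
        exact absurd hvu.isInfix hinf
    · rw [if_neg h] at hpre
      cases u with
      | nil => exact absurd rfl hu
      | cons a u₂ =>
        obtain ⟨z, hz⟩ := hpre
        simp only [List.cons_append] at hz
        have hac : a = c := (List.cons.injEq _ _ _ _ ▸ hz).1
        have hz2 : u₂ ++ z = pvMyRep t v rest := (List.cons.injEq _ _ _ _ ▸ hz).2
        subst hac
        cases hu2 : u₂ with
        | nil => exact ⟨rest, by simp [hu2] at hz2 ⊢⟩
        | cons b u3 =>
          subst hu2
          have hp2 : (b :: u3) <+: rest := by
            apply ih (b :: u3) (by simp) _ _ ⟨z, hz2⟩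
            · rw [← hlast]; simp [List.getLast?_cons_cons]
            · intro hcon; exact hinf (hcon.trans (List.infix_cons (List.infix_refl _)))
          obtain ⟨w, hw⟩ := hp2
          exact ⟨w, by rw [← hw]; simp⟩

-- replacing t by v cannot create a new occurrence of a token '$' :: u\' at the front
theorem pvNoCreate (t v : List Char) (hv1 : '$' ∉ v) (hv2 : '}' ∉ v) (hv3 : v ≠ [])
    (u' : List Char) (hu1 : u' ≠ []) (hu2 : u'.getLast? = some '}') (hu3 : ¬ v <:+: u') :
    ∀ s : List Char, ('$' :: u') <+: pvMyRep t v s → ('$' :: u') <+: s := by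
  intro s hpre
  cases s with
  | nil => rw [pvMyRep] at hpre; simp at hpre
  | cons c rest =>
    rw [pvMyRep] at hpre
    by_cases h : t.isPrefixOf (c :: rest)
    · rw [if_pos h] at hpre
      cases v with
      | nil => exact absurd rfl hv3
      | cons vc vv =>
        obtain ⟨z, hz⟩ := hpre
        have : vc = '$' := by simpa using congrArg (·.head?) hz.symm
        exact absurd (by simp [this] : '$' ∈ vc :: vv) hv1
    · rw [if_neg h] at hpre
      obtain ⟨z, hz⟩ := hpre
      simp only [List.cons_append] at hz
      have hc : '$' = c := (List.cons.injEq _ _ _ _ ▸ hz).1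
      have hz2 : u' ++ z = pvMyRep t v rest := (List.cons.injEq _ _ _ _ ▸ hz).2
      have := pvPrefix_transfer t v hv2 rest u' hu1 hu2 hu3 ⟨z, hz2⟩
      obtain ⟨w, hw⟩ := this
      exact ⟨w, by rw [← hc, ← hw]; simp⟩

-- a '$'-free block at the front is copied by the scan (every token starts with '$')
theorem pvScan_dollarfree (tbl : List (List Char × List Char))
    (hT : ∀ p ∈ tbl, p.1.head? = some '$') (v : List Char) (hv : '$' ∉ v) :
    ∀ x : List Char, pvScan tbl (v ++ x) = v ++ pvScan tbl x := by
  induction v with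
  | nil => intro x; simp
  | cons c v₂ ih =>
    intro x
    have hc : c ≠ '$' := by intro h; exact hv (by simp [h])
    rw [List.cons_append, pvScan]
    have hfind : tbl.find? (fun p => p.1.isPrefixOf (c :: (v₂ ++ x))) = none := by
      rw [List.find?_eq_none]
      intro p hp
      obtain ⟨tc, tt, hsplit⟩ : ∃ tc tt, p.1 = tc :: tt := by
        cases hcase : p.1 with
        | nil => have := hT p hp; rw [hcase] at this; simp at this
        | cons a b => exact ⟨a, b, rfl⟩
      have htc : tc = '$' := by have := hT p hp; rw [hsplit] at this; simpa using this
      rw [hsplit, htc]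
      simp [List.isPrefixOf]
      intro hcon
      exact absurd hcon.symm hc
    simp only [hfind]
    rw [ih (by intro hm; exact hv (by simp [hm])) x]
    simp

theorem pvFind?_congr {α : Type} (f g : α → Bool) :
    ∀ (T : List α), (∀ p ∈ T, f p = g p) → T.find? f = T.find? g := by
  intro T h
  induction T with
  | nil => rfl
  | cons a T ih =>
    simp only [List.find?_cons]
    rw [h a (by simp)]
    cases g a
    · exact ih (fun p hp => h p (by simp [hp]))
    · rfl

theorem pvScan_match (tbl : List (List Char × List Char)) (c : Char) (rest : List Char)
    (p : List Char × List Char)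
    (h : tbl.find? (fun q => q.1.isPrefixOf (c :: rest)) = some p) :
    pvScan tbl (c :: rest) = p.2 ++ pvScan tbl (rest.drop (p.1.length - 1)) := by
  rw [pvScan, h]

theorem pvScan_nomatch (tbl : List (List Char × List Char)) (c : Char) (rest : List Char)
    (h : tbl.find? (fun q => q.1.isPrefixOf (c :: rest)) = none) :
    pvScan tbl (c :: rest) = c :: pvScan tbl rest := by
  rw [pvScan, h]

-- peeling the first table entry off the scan = doing one full replace pass first
theorem pvScan_cons (t v : List Char) (T : List (List Char × List Char))
    (ht : t.head? = some '$')
    (hv1 : '$' ∉ v) (hv2 : '}' ∉ v) (hv3 : v ≠ [])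
    (hT : ∀ p ∈ T, p.1.head? = some '$' ∧ p.1.drop 1 ≠ [] ∧
          (p.1.drop 1).getLast? = some '}' ∧ '$' ∉ p.1.drop 1 ∧ ¬ v <:+: p.1.drop 1)
    (hpw : T.Pairwise (fun p q => ¬ p.1 <+: q.1 ∧ ¬ q.1 <+: p.1)) :
    ∀ s : List Char, pvScan ((t, v) :: T) s = pvScan T (pvMyRep t v s) := by
  have htne : t ≠ [] := by intro hc; rw [hc] at ht; simp at ht
  have htlen : 1 ≤ t.length := by cases t with | nil => exact absurd rfl htne | cons a b => simp
  have hheads : ∀ p ∈ T, p.1.head? = some '$' := fun p hp => (hT p hp).1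
  have hshape : ∀ p ∈ T, ∃ u', p.1 = '$' :: u' := by
    intro p hp
    have h1 := hheads p hp
    have hne : p.1 ≠ [] := by intro hc; rw [hc] at h1; simp at h1
    obtain ⟨a, b, hab⟩ := List.exists_cons_of_ne_nil hne
    have ha : a = '$' := by rw [hab] at h1; simpa using h1
    exact ⟨b, by rw [hab, ha]⟩
  have main : ∀ n (s : List Char), s.length ≤ n →
      pvScan ((t, v) :: T) s = pvScan T (pvMyRep t v s) := by
    intro n
    induction n with
    | zero =>
      intro s hs
      have : s = [] := List.eq_nil_of_length_eq_zero (by omega)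
      subst this
      rw [pvMyRep, pvScan, pvScan]
    | succ n ihn =>
      intro s hs
      cases s with
      | nil => rw [pvMyRep, pvScan, pvScan]
      | cons c rest =>
        have hsr : rest.length ≤ n := by simp at hs; omega
        by_cases h : t.isPrefixOf (c :: rest)
        · -- the head token matches: both sides emit v then continue past the token
          have hfpos : ((t, v) :: T).find? (fun q => q.1.isPrefixOf (c :: rest)) = some (t, v) :=
            List.find?_cons_of_pos (by simpa using h)
          rw [pvScan_match _ _ _ _ hfpos]
          rw [pvMyRep, if_pos h, pvScan_dollarfree T hheads v hv1]
          rw [ihn _ (by simp only [List.length_drop]; omega)]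
        · cases hfind : T.find? (fun q => q.1.isPrefixOf (c :: rest)) with
          | none =>
            -- no token matches: both sides copy c
            have hfneg : ((t, v) :: T).find? (fun q => q.1.isPrefixOf (c :: rest)) = none := by
              rw [List.find?_cons_of_neg (by simpa using h), hfind]
            rw [pvScan_nomatch _ _ _ hfneg, pvMyRep, if_neg h]
            have hnone : T.find? (fun q => q.1.isPrefixOf (c :: pvMyRep t v rest)) = none := by
              rw [List.find?_eq_none]
              intro p hp
              obtain ⟨u', hu'⟩ := hshape p hp
              obtain ⟨h1, h2, h3, h4, h5⟩ := hT p hp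
              rw [hu'] at h2 h3 h4 h5 ⊢
              simp only [List.drop_succ_cons, List.drop_zero] at h2 h3 h4 h5
              simp only [Bool.not_eq_true]
              rw [← Bool.not_eq_true]
              intro hc2
              have hpre : ('$' :: u') <+: (c :: pvMyRep t v rest) := List.isPrefixOf_iff_prefix.mp hc2
              have hmy : (c :: pvMyRep t v rest) = pvMyRep t v (c :: rest) := by
                rw [pvMyRep, if_neg h]
              rw [hmy] at hpre
              have := pvNoCreate t v hv1 hv2 hv3 u' h2 h3 h5 (c :: rest) hpre
              have hfp := List.find?_eq_none.mp hfind p hp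
              rw [hu'] at hfp
              exact hfp (List.isPrefixOf_iff_prefix.mpr this)
            rw [pvScan_nomatch _ _ _ hnone, ihn rest hsr]
          | some p =>
            obtain ⟨t', v'⟩ := p
            have hmem : (t', v') ∈ T := List.mem_of_find?_eq_some hfind
            have hpred : t'.isPrefixOf (c :: rest) := by simpa using List.find?_some hfind
            have ht'pre : t' <+: (c :: rest) := List.isPrefixOf_iff_prefix.mp hpred
            obtain ⟨h1, h2, h3, h4, h5⟩ := hT (t', v') hmem
            obtain ⟨u', hu0⟩ := hshape (t', v') hmem
            have hu' : t' = '$' :: u' := hu0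
            -- LHS
            have hfsome : ((t, v) :: T).find? (fun q => q.1.isPrefixOf (c :: rest)) = some (t', v') := by
              rw [List.find?_cons_of_neg (by simpa using h), hfind]
            rw [pvScan_match _ _ _ _ hfsome]
            -- RHS: myRep copies the t' occurrence verbatim
            have hcopy := pvMyRep_copy t v ht t' (c :: rest) ht'pre h h4
            rw [pvMyRep, if_neg h]
            rw [pvMyRep, if_neg h] at hcopy
            rw [show c :: pvMyRep t v rest = pvMyRep t v (c :: rest) from by rw [pvMyRep, if_neg h],
                pvMyRep, if_neg h, hcopy]
            -- the find? over the copied string returns the same entry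
            set Q := pvMyRep t v ((c :: rest).drop t'.length) with hQ
            have hsame : T.find? (fun q => q.1.isPrefixOf (t' ++ Q)) = some (t', v') := by
              rw [pvFind?_congr _ (fun q => q.1.isPrefixOf (c :: rest)) T ?_, hfind]
              intro p hp
              by_cases hpe : p = (t', v')
              · subst hpe
                show t'.isPrefixOf (t' ++ Q) = t'.isPrefixOf (c :: rest)
                rw [hpred, List.isPrefixOf_iff_prefix.mpr (List.prefix_append _ _)]
              · have hrel := List.Pairwise.forall
                  (fun a b hab => ⟨hab.2, hab.1⟩) hpw hp hmem hpe
                have hfalse1 : ¬ p.1 <+: (t' ++ Q) := by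
                  intro hc2
                  rcases List.prefix_or_prefix_of_prefix hc2 (List.prefix_append _ _) with h6 | h6
                  · exact hrel.1 h6
                  · exact hrel.2 h6
                have hfalse2 : ¬ p.1 <+: (c :: rest) := by
                  intro hc2
                  rcases List.prefix_or_prefix_of_prefix hc2 ht'pre with h6 | h6
                  · exact hrel.1 h6
                  · exact hrel.2 h6
                show p.1.isPrefixOf (t' ++ Q) = p.1.isPrefixOf (c :: rest)
                rw [Bool.eq_false_iff.mpr (fun hb => hfalse1 (List.isPrefixOf_iff_prefix.mp hb)),
                    Bool.eq_false_iff.mpr (fun hb => hfalse2 (List.isPrefixOf_iff_prefix.mp hb))]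
            -- unfold the scan on the copied string
            have hcons : t' ++ Q = '$' :: (u' ++ Q) := by rw [hu', List.cons_append]
            rw [hcons] at hsame ⊢
            rw [pvScan_match _ _ _ _ hsame]
            have hlen : u'.length = t'.length - 1 := by rw [hu']; simp
            have hd2 : (c :: rest).drop t'.length = rest.drop (t'.length - 1) := by
              rw [hu']; simp
            simp only [hQ, hd2]
            rw [List.drop_left' hlen]
            rw [ihn (rest.drop (t'.length - 1)) (by simp only [List.length_drop]; omega)]
  exact fun s => main s.length s le_rfl

theorem pvChain (l : List Char) :
    pvScan pvItems l =
      pvMyRep "${ext}".toList "epub".toList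
      (pvMyRep "${format}".toList "ebook".toList
      (pvMyRep "${bookseries.number}".toList "01".toList
      (pvMyRep "${bookseries.title}".toList "Foundation Series".toList
      (pvMyRep "${category}".toList "Fiction".toList
      (pvMyRep "${title}".toList "Foundation".toList
      (pvMyRep "${author}".toList "Isaac Asimov".toList
      (pvMyRep "${author.sortname}".toList "Asimov, Isaac".toList
      (pvMyRep "${language}".toList "English".toList l)))))))) := by
  show pvScan [("${language}".toList, "English".toList),
   ("${author.sortname}".toList, "Asimov, Isaac".toList),
   ("${author}".toList, "Isaac Asimov".toList),
   ("${title}".toList, "Foundation".toList),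
   ("${category}".toList, "Fiction".toList),
   ("${bookseries.title}".toList, "Foundation Series".toList),
   ("${bookseries.number}".toList, "01".toList),
   ("${format}".toList, "ebook".toList),
   ("${ext}".toList, "epub".toList)] l = _
  rw [pvScan_cons _ _ _ (by decide) (by decide) (by decide) (by decide) (by decide) (by decide)]
  rw [pvScan_cons _ _ _ (by decide) (by decide) (by decide) (by decide) (by decide) (by decide)]
  rw [pvScan_cons _ _ _ (by decide) (by decide) (by decide) (by decide) (by decide) (by decide)]
  rw [pvScan_cons _ _ _ (by decide) (by decide) (by decide) (by decide) (by decide) (by decide)]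
  rw [pvScan_cons _ _ _ (by decide) (by decide) (by decide) (by decide) (by decide) (by decide)]
  rw [pvScan_cons _ _ _ (by decide) (by decide) (by decide) (by decide) (by decide) (by decide)]
  rw [pvScan_cons _ _ _ (by decide) (by decide) (by decide) (by decide) (by decide) (by decide)]
  rw [pvScan_cons _ _ _ (by decide) (by decide) (by decide) (by decide) (by decide) (by decide)]
  rw [pvScan_cons _ _ _ (by decide) (by decide) (by decide) (by decide) (by decide) (by decide)]
  rw [pvScan_nil_table]

theorem pvStrChain (s : String) :
    PySem.Str.replace (PySem.Str.replace (PySem.Str.replace (PySem.Str.replace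
      (PySem.Str.replace (PySem.Str.replace (PySem.Str.replace (PySem.Str.replace
      (PySem.Str.replace s "${language}" "English") "${author.sortname}" "Asimov, Isaac")
      "${author}" "Isaac Asimov") "${title}" "Foundation") "${category}" "Fiction")
      "${bookseries.title}" "Foundation Series") "${bookseries.number}" "01")
      "${format}" "ebook") "${ext}" "epub"
      = String.ofList (pvScan pvItems s.toList) := by
  simp only [PySem.Str.replace, String.toList_ofList]
  rw [pvChain]
  rw [pvReplace_eq _ _ _ (by decide), pvReplace_eq _ _ _ (by decide),
      pvReplace_eq _ _ _ (by decide), pvReplace_eq _ _ _ (by decide),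
      pvReplace_eq _ _ _ (by decide), pvReplace_eq _ _ _ (by decide),
      pvReplace_eq _ _ _ (by decide), pvReplace_eq _ _ _ (by decide),
      pvReplace_eq _ _ _ (by decide)]

-- ===== VERDICT (by name: the statement is the Claim_ definition above) =====
theorem generate_sample_result_py_spec : Claim_equal_generate_sample_result_py := by
  intro fp fn _
  unfold Spec_generate_sample_result_py
  simp only [generate_sample_result_py, generate_sample_result_py_alt, pvReplacements, List.foldl]
  rw [pvStrChain, pvStrChain]
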